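-- pv_equiv track=rewrite | github.com/theperiperi/Advent-of-Code-2025 | day4/part2.py | total_removed_paper
-- ===== SOURCE A (Python) =====
-- def total_removed_paper(grid_lines):
--     """
--     grid_lines: list of strings like ['..@@.@@@@.', '@@@.@.@.@@', ...]
--     returns: total_removed (int)
--     """
--     h = len(grid_lines)
--     w = len(grid_lines[0]) if h > 0 else 0
--     grid = [list(row) for row in grid_lines]
--
--     dirs = [(-1, -1), (-1, 0), (-1, 1),
--             ( 0, -1),          ( 0, 1),
--             ( 1, -1), ( 1, 0), ( 1, 1)]
--
--     total_removed = 0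
--
--     while True:
--         removable = []
--
--         # Find all currently accessible rolls
--         for r in range(h):
--             for c in range(w):
--                 if grid[r][c] != '@':
--                     continue
--                 adj = 0
--                 for dr, dc in dirs:
--                     rr, cc = r + dr, c + dc
--                     if 0 <= rr < h and 0 <= cc < w and grid[rr][cc] == '@':
--                         adj += 1
--                 if adj < 4:
--                     removable.append((r, c))
--
--         # Stop if no more can be removed
--         if not removable:
--             break
--
--         # Remove them all at once
--         for r, c in removable:
--             grid[r][c] = '.'
--
--         total_removed += len(removable)
--
--     return total_removed
-- ===== SOURCE B (Python) =====
-- def total_removed_paper(grid_lines):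
--     """
--     grid_lines: list of strings like ['..@@.@@@@.', '@@@.@.@.@@', ...]
--     returns: total_removed (int)
--     """
--     h = len(grid_lines)
--     w = len(grid_lines[0]) if h > 0 else 0
--
--     dirs = [(-1, -1), (-1, 0), (-1, 1),
--             ( 0, -1),          ( 0, 1),
--             ( 1, -1), ( 1, 0), ( 1, 1)]
--
--     # Set of coordinates still holding a roll (only the first w columns count).
--     rolls = {(r, c)
--              for r, row in enumerate(grid_lines)
--              for c, ch in enumerate(row[:w]) if ch == '@'}
--
--     candidates = set(rolls)
--     total = 0
--     while candidates:
--         removable = [(r, c) for (r, c) in candidates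
--                      if (r, c) in rolls
--                      and sum(((r + dr, c + dc) in rolls) for dr, dc in dirs) < 4]
--         rolls.difference_update(removable)
--         total += len(removable)
--         # only neighbours of freshly removed rolls can newly become removable
--         candidates = {(r + dr, c + dc) for (r, c) in removable for dr, dc in dirs} & rolls
--     return total
-- ===== Notes on version B (the rewrite author's own statement) =====
-- stated objective: alternative
-- what changed: B keeps the rolls as a set of coordinates with a candidate frontier and, after the first round, re-examines only neighbours of freshly removed rolls instead of rescanning the whole char grid every round like A.
import Mathlib
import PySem

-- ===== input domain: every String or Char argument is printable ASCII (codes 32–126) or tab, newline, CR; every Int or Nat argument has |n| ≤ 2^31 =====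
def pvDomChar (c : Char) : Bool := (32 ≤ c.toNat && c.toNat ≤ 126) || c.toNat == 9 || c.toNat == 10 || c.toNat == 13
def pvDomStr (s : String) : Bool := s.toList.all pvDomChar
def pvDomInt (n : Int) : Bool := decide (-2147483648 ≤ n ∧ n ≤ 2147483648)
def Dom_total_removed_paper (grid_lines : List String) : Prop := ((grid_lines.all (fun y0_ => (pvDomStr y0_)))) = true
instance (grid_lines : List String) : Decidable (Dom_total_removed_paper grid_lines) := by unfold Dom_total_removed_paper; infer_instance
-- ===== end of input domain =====

-- B peels a set of roll coordinates with a candidate frontier (after the first round only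
-- neighbours of freshly removed rolls are re-examined) instead of A's per-round full-grid rescan.

-- ===== PORT A =====

def pvDirs : List (Int × Int) :=
  [(-1, -1), (-1, 0), (-1, 1), (0, -1), (0, 1), (1, -1), (1, 0), (1, 1)]

def pvCellA (grid : List (List Char)) (r c : Int) : Char :=
  PySem.List.pyGetD (PySem.List.pyGetD grid r []) c ' '

def pvAdjA (grid : List (List Char)) (h w r c : Int) : Int :=
  pvDirs.foldl (fun adj d =>
    if 0 ≤ r + d.1 ∧ r + d.1 < h ∧ 0 ≤ c + d.2 ∧ c + d.2 < w ∧ pvCellA grid (r + d.1) (c + d.2) = '@'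
    then adj + 1 else adj) 0

def pvRemovableA (grid : List (List Char)) (h w : Int) : List (Int × Int) :=
  (PySem.List.pyRange 0 h).foldl (fun acc r =>
    (PySem.List.pyRange 0 w).foldl (fun acc c =>
      if pvCellA grid r c ≠ '@' then acc
      else if pvAdjA grid h w r c < 4 then acc ++ [(r, c)] else acc) acc) []

def pvRemoveA (grid : List (List Char)) (ps : List (Int × Int)) : List (List Char) :=
  ps.foldl (fun g p =>
    PySem.List.pySetD g p.1 (PySem.List.pySetD (PySem.List.pyGetD g p.1 []) p.2 '.')) grid

def pvLoopA (grid : List (List Char)) (h w : Int) (total : Int) : Nat → Int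
  | 0 => total
  | fuel + 1 =>
    let removable := pvRemovableA grid h w
    if removable = [] then total
    else pvLoopA (pvRemoveA grid removable) h w (total + removable.length) fuel

def total_removed_paper (grid_lines : List String) : Int :=
  let h : Int := grid_lines.length
  let w : Int := if 0 < h then ((grid_lines.headD "").length : Int) else 0
  let grid := grid_lines.map (fun row => row.toList)
  pvLoopA grid h w 0 (grid_lines.length * (grid_lines.headD "").length + 2)

-- ===== PORT B =====

def pvCountB (rolls : PySem.Set (Int × Int)) (r c : Int) : Int :=
  (pvDirs.map (fun d => if PySem.Set.contains rolls (r + d.1, c + d.2) then (1 : Int) else 0)).sum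

def pvRollsB (grid_lines : List String) (w : Int) : PySem.Set (Int × Int) :=
  PySem.Set.ofList ((PySem.List.enumerate grid_lines).flatMap (fun rp =>
    (PySem.List.enumerate (PySem.List.slice rp.2.toList none (some w))).filterMap (fun cp =>
      if cp.2 = '@' then some (rp.1, cp.1) else none)))

def pvRemovableB (cands rolls : PySem.Set (Int × Int)) : List (Int × Int) :=
  cands.filter (fun p => PySem.Set.contains rolls p && decide (pvCountB rolls p.1 p.2 < 4))

def pvLoopB (rolls cands : PySem.Set (Int × Int)) (total : Int) : Nat → Int
  | 0 => total
  | fuel + 1 =>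
    if cands = [] then total
    else
      let removable := pvRemovableB cands rolls
      let rolls' := PySem.Set.diff rolls removable
      let cands' := PySem.Set.inter
        (PySem.Set.ofList (removable.flatMap (fun p => pvDirs.map (fun d => (p.1 + d.1, p.2 + d.2)))))
        rolls'
      pvLoopB rolls' cands' (total + removable.length) fuel

def total_removed_paper_alt (grid_lines : List String) : Int :=
  let h : Int := grid_lines.length
  let w : Int := if 0 < h then ((grid_lines.headD "").length : Int) else 0
  let rolls := pvRollsB grid_lines w
  pvLoopB rolls (PySem.Set.ofList rolls) 0 (grid_lines.length * (grid_lines.headD "").length + 2)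

-- ===== PRECONDITION & SPEC =====
-- A raises IndexError iff some row is shorter than row 0 (it reads grid[r][c] for every c < len(row 0));
-- Pre_ excludes exactly those inputs.
def Pre_total_removed_paper (grid_lines : List String) : Prop :=
  ∀ s ∈ grid_lines, (grid_lines.headD "").length ≤ s.length

instance (grid_lines : List String) : Decidable (Pre_total_removed_paper grid_lines) := by
  unfold Pre_total_removed_paper; infer_instance

def pvWitness_total_removed_paper : List String := ["@@.", "@@@", "..@"]

def Spec_total_removed_paper (grid_lines : List String) (out : Int) : Prop := out = total_removed_paper_alt grid_lines
instance (grid_lines : List String) (out : Int) : Decidable (Spec_total_removed_paper grid_lines out) := by unfold Spec_total_removed_paper; infer_instance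

-- ===== CLAIM (what is proved, stated in full; the proofs are below) =====
def Claim_equal_total_removed_paper : Prop := ∀ (grid_lines : List String), Dom_total_removed_paper grid_lines → Pre_total_removed_paper grid_lines → Spec_total_removed_paper grid_lines (total_removed_paper grid_lines)


-- ===== LEMMAS AND PROOFS =====

abbrev pvAlive (g : List (List Char)) (h w r c : Int) : Prop :=
  0 ≤ r ∧ r < h ∧ 0 ≤ c ∧ c < w ∧ pvCellA g r c = '@'

def pvShape (g : List (List Char)) (h w : Int) : Prop :=
  (g.length : Int) = h ∧ ∀ row ∈ g, w ≤ (row.length : Int)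

lemma pvAdjA_eq_sum (g : List (List Char)) (h w r c : Int) :
    pvAdjA g h w r c =
      (pvDirs.map (fun d => if pvAlive g h w (r + d.1) (c + d.2) then (1 : Int) else 0)).sum := by
  unfold pvAdjA
  have hfun : (fun (adj : Int) (d : Int × Int) =>
      if 0 ≤ r + d.1 ∧ r + d.1 < h ∧ 0 ≤ c + d.2 ∧ c + d.2 < w ∧ pvCellA g (r + d.1) (c + d.2) = '@'
      then adj + 1 else adj) =
      (fun adj d => adj + if pvAlive g h w (r + d.1) (c + d.2) then (1 : Int) else 0) := by
    funext adj d
    split_ifs <;> omega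
  rw [hfun, PySem.List.foldl_add]
  simp

lemma pvRemovableA_eq_flatMap (g : List (List Char)) (h w : Int) :
    pvRemovableA g h w =
      (PySem.List.pyRange 0 h).flatMap (fun r =>
        ((PySem.List.pyRange 0 w).filter
          (fun c => decide (pvCellA g r c = '@') && decide (pvAdjA g h w r c < 4))).map
          (fun c => (r, c))) := by
  unfold pvRemovableA
  have hin : ∀ (r : Int) (acc : List (Int × Int)),
      (PySem.List.pyRange 0 w).foldl (fun acc c =>
        if pvCellA g r c ≠ '@' then acc
        else if pvAdjA g h w r c < 4 then acc ++ [(r, c)] else acc) acc =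
      acc ++ ((PySem.List.pyRange 0 w).filter
          (fun c => decide (pvCellA g r c = '@') && decide (pvAdjA g h w r c < 4))).map
          (fun c => (r, c)) := by
    intro r acc
    rw [show (fun (acc : List (Int × Int)) (c : Int) =>
        if pvCellA g r c ≠ '@' then acc
        else if pvAdjA g h w r c < 4 then acc ++ [(r, c)] else acc) =
        (fun acc c => if (decide (pvCellA g r c = '@') && decide (pvAdjA g h w r c < 4)) = true
          then acc ++ [(r, c)] else acc) from ?_]
    · exact PySem.List.foldl_append_if _ _ _ _
    · funext acc c
      by_cases h1 : pvCellA g r c = '@' <;> by_cases h2 : pvAdjA g h w r c < 4 <;> simp [h1, h2]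
  rw [show (fun (acc : List (Int × Int)) (r : Int) =>
      (PySem.List.pyRange 0 w).foldl (fun acc c =>
        if pvCellA g r c ≠ '@' then acc
        else if pvAdjA g h w r c < 4 then acc ++ [(r, c)] else acc) acc) =
      (fun acc r => acc ++ ((PySem.List.pyRange 0 w).filter
          (fun c => decide (pvCellA g r c = '@') && decide (pvAdjA g h w r c < 4))).map
          (fun c => (r, c))) from funext fun acc => funext fun r => hin r acc]
  rw [PySem.List.foldl_append_eq_flatMap]
  simp

lemma pvMem_removableA {g : List (List Char)} {h w : Int} (p : Int × Int) :
    p ∈ pvRemovableA g h w ↔ pvAlive g h w p.1 p.2 ∧ pvAdjA g h w p.1 p.2 < 4 := by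
  rw [pvRemovableA_eq_flatMap]
  simp only [List.mem_flatMap, List.mem_map, List.mem_filter, PySem.List.mem_pyRange_one,
    Bool.and_eq_true, decide_eq_true_eq]
  constructor
  · rintro ⟨r, ⟨hr0, hrh⟩, c, ⟨⟨hc0, hcw⟩, hch, hadj⟩, rfl⟩
    exact ⟨⟨hr0, hrh, hc0, hcw, hch⟩, hadj⟩
  · rintro ⟨⟨hr0, hrh, hc0, hcw, hch⟩, hadj⟩
    exact ⟨p.1, ⟨hr0, hrh⟩, p.2, ⟨⟨hc0, hcw⟩, hch, hadj⟩, rfl⟩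

lemma pvNodup_removableA (g : List (List Char)) (h w : Int) : (pvRemovableA g h w).Nodup := by
  rw [pvRemovableA_eq_flatMap, List.nodup_flatMap]
  constructor
  · intro r _
    have hnd : (PySem.List.pyRange 0 w).Nodup :=
      List.Pairwise.imp (fun hab => by omega) (PySem.List.pairwise_lt_pyRange_one 0 w)
    exact (hnd.filter _).map (by intro x y hxy; simpa using hxy)
  · refine List.Pairwise.imp ?_ (PySem.List.pairwise_lt_pyRange_one 0 h)
    intro r r' hlt x hx hy
    simp only [List.mem_map, List.mem_filter] at hx hy
    obtain ⟨c, _, rfl⟩ := hx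
    obtain ⟨c', _, h2⟩ := hy
    exact absurd (congrArg Prod.fst h2.symm) (by simp; omega)

lemma pvGetD_set {α : Type} (l : List α) (n i : Nat) (a : α) (d : α) (hn : n < l.length) :
    (l.set n a).getD i d = if i = n then a else l.getD i d := by
  by_cases h : i = n
  · subst h
    rw [if_pos rfl, List.getD_eq_getElem?_getD, List.getElem?_set_self hn, Option.getD_some]
  · rw [if_neg h, List.getD_eq_getElem?_getD, List.getElem?_set_ne (fun hh => h hh.symm),
      ← List.getD_eq_getElem?_getD]

lemma pvCellA_set1 {g : List (List Char)} {h w : Int} (hs : pvShape g h w)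
    {p : Int × Int} (hp : 0 ≤ p.1 ∧ p.1 < h ∧ 0 ≤ p.2 ∧ p.2 < w) (r c : Int)
    (hr : 0 ≤ r) (hc : 0 ≤ c) :
    pvCellA (PySem.List.pySetD g p.1 (PySem.List.pySetD (PySem.List.pyGetD g p.1 []) p.2 '.')) r c
      = if (r, c) = p then '.' else pvCellA g r c := by
  obtain ⟨hlen, hrow⟩ := hs
  obtain ⟨hp1, hp2, hp3, hp4⟩ := hp
  have hn : p.1.toNat < g.length := by omega
  have hrowmem : g.getD p.1.toNat [] ∈ g := by
    rw [List.getD_eq_getElem?_getD, List.getElem?_eq_getElem hn]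
    exact List.getElem_mem hn
  have hm : p.2.toNat < (g.getD p.1.toNat []).length := by
    have := hrow _ hrowmem; omega
  unfold pvCellA
  rw [PySem.List.pySetD_of_nonneg _ _ hp1, PySem.List.pyGetD_of_nonneg _ _ hp1,
    PySem.List.pySetD_of_nonneg _ _ hp3, PySem.List.pyGetD_of_nonneg _ _ hr,
    PySem.List.pyGetD_of_nonneg _ _ hr, PySem.List.pyGetD_of_nonneg _ _ hc,
    PySem.List.pyGetD_of_nonneg _ _ hc]
  rw [pvGetD_set _ _ _ _ _ hn]
  have hpe : ((r, c) = p) ↔ (r.toNat = p.1.toNat ∧ c.toNat = p.2.toNat) := by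
    obtain ⟨a, b⟩ := p
    constructor
    · rintro h'; injection h' with h1 h2; constructor <;> omega
    · rintro ⟨h1, h2⟩
      simp_all only [Prod.mk.injEq]
      constructor <;> omega
  by_cases hrn : r.toNat = p.1.toNat
  · rw [if_pos hrn, pvGetD_set _ _ _ _ _ hm]
    by_cases hcm : c.toNat = p.2.toNat
    · rw [if_pos hcm, if_pos (hpe.2 ⟨hrn, hcm⟩)]
    · rw [if_neg hcm, if_neg (fun hh => hcm (hpe.1 hh).2), hrn]
  · rw [if_neg hrn, if_neg (fun hh => hrn (hpe.1 hh).1)]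

lemma pvShape_set1 {g : List (List Char)} {h w : Int} (hs : pvShape g h w)
    {p : Int × Int} (hp : 0 ≤ p.1 ∧ p.1 < h ∧ 0 ≤ p.2 ∧ p.2 < w) :
    pvShape (PySem.List.pySetD g p.1 (PySem.List.pySetD (PySem.List.pyGetD g p.1 []) p.2 '.')) h w := by
  obtain ⟨hlen, hrow⟩ := hs
  obtain ⟨hp1, hp2, hp3, hp4⟩ := hp
  have hn : p.1.toNat < g.length := by omega
  constructor
  · rw [PySem.List.length_pySetD]; exact hlen
  · intro row hmem
    rw [PySem.List.pySetD_of_nonneg _ _ hp1] at hmem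
    rcases List.mem_or_eq_of_mem_set hmem with hmem' | rfl
    · exact hrow _ hmem'
    · rw [PySem.List.length_pySetD, PySem.List.pyGetD_of_nonneg _ _ hp1]
      refine hrow _ ?_
      rw [List.getD_eq_getElem?_getD, List.getElem?_eq_getElem hn]
      exact List.getElem_mem hn

lemma pvRemoveA_cell {g : List (List Char)} {h w : Int} (hs : pvShape g h w)
    {ps : List (Int × Int)} (hp : ∀ p ∈ ps, 0 ≤ p.1 ∧ p.1 < h ∧ 0 ≤ p.2 ∧ p.2 < w) (r c : Int)
    (hr : 0 ≤ r) (hc : 0 ≤ c) :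
    pvCellA (pvRemoveA g ps) r c = if (r, c) ∈ ps then '.' else pvCellA g r c := by
  induction ps generalizing g with
  | nil => simp [pvRemoveA]
  | cons p ps ih =>
    have hstep := pvCellA_set1 hs (hp p List.mem_cons_self) r c hr hc
    have hshape' := pvShape_set1 hs (hp p List.mem_cons_self)
    have hrest : pvCellA (pvRemoveA (PySem.List.pySetD g p.1
        (PySem.List.pySetD (PySem.List.pyGetD g p.1 []) p.2 '.')) ps) r c =
        if (r, c) ∈ ps then '.'
        else pvCellA (PySem.List.pySetD g p.1 (PySem.List.pySetD (PySem.List.pyGetD g p.1 []) p.2 '.')) r c :=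
      ih hshape' (fun q hq => hp q (List.mem_cons_of_mem _ hq))
    have h0 : pvCellA (pvRemoveA g (p :: ps)) r c = pvCellA (pvRemoveA (PySem.List.pySetD g p.1
        (PySem.List.pySetD (PySem.List.pyGetD g p.1 []) p.2 '.')) ps) r c := rfl
    rw [h0, hrest, hstep]
    by_cases h1 : (r, c) ∈ ps <;> by_cases h2 : (r, c) = p <;>
      simp [h1, h2, List.mem_cons]

lemma pvShape_removeA {g : List (List Char)} {h w : Int} (hs : pvShape g h w)
    {ps : List (Int × Int)} (hp : ∀ p ∈ ps, 0 ≤ p.1 ∧ p.1 < h ∧ 0 ≤ p.2 ∧ p.2 < w) :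
    pvShape (pvRemoveA g ps) h w := by
  induction ps generalizing g with
  | nil => exact hs
  | cons p ps ih =>
    exact ih (pvShape_set1 hs (hp p List.mem_cons_self)) (fun q hq => hp q (List.mem_cons_of_mem _ hq))

lemma pvMem_removableB {cands rolls : PySem.Set (Int × Int)} (p : Int × Int) :
    p ∈ pvRemovableB cands rolls ↔ p ∈ cands ∧ p ∈ rolls ∧ pvCountB rolls p.1 p.2 < 4 := by
  unfold pvRemovableB
  simp only [List.mem_filter, Bool.and_eq_true, decide_eq_true_eq, PySem.Set.contains_iff]

lemma pvCountB_eq_adjA {g : List (List Char)} {h w : Int} {rolls : PySem.Set (Int × Int)}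
    (hS2 : ∀ p : Int × Int, p ∈ rolls ↔ pvAlive g h w p.1 p.2) (r c : Int) :
    pvCountB rolls r c = pvAdjA g h w r c := by
  rw [pvAdjA_eq_sum]
  unfold pvCountB
  congr 1
  apply List.map_congr_left
  intro d _
  by_cases hm : (r + d.1, c + d.2) ∈ rolls
  · rw [if_pos ((PySem.Set.contains_iff _ _).2 hm), if_pos ((hS2 _).1 hm)]
  · rw [if_neg (fun hh => hm ((PySem.Set.contains_iff _ _).1 hh)),
      if_neg (fun hh => hm ((hS2 _).2 hh))]

lemma pvMem_enumerate {α : Type} (xs : List α) (s : Int) (p : Int × α) :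
    p ∈ PySem.List.enumerate xs s ↔ ∃ n : Nat, xs[n]? = some p.2 ∧ p.1 = s + n := by
  induction xs generalizing s with
  | nil => simp [PySem.List.enumerate_nil]
  | cons x xs ih =>
    rw [PySem.List.enumerate_cons, List.mem_cons, ih]
    constructor
    · rintro (rfl | ⟨n, hn, hp1⟩)
      · exact ⟨0, by simp, by simp⟩
      · exact ⟨n + 1, by simpa using hn, by push_cast; omega⟩
    · rintro ⟨n, hn, hp1⟩
      cases n with
      | zero =>
        left
        obtain ⟨p1, p2⟩ := p
        simp_all
      | succ n =>
        right
        exact ⟨n, by simpa using hn, by push_cast at hp1 ⊢; omega⟩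

lemma pvMem_rollsB {grid_lines : List String} {w : Int} (hw : 0 ≤ w)
    (hpre : ∀ s ∈ grid_lines, w ≤ (s.length : Int)) (p : Int × Int) :
    p ∈ pvRollsB grid_lines w ↔
      pvAlive (grid_lines.map (fun row => row.toList)) (grid_lines.length : Int) w p.1 p.2 := by
  unfold pvRollsB
  rw [PySem.Set.mem_ofList, List.mem_flatMap]
  constructor
  · rintro ⟨rp, hrp, hinner⟩
    rw [pvMem_enumerate] at hrp
    obtain ⟨n, hn, hrp1⟩ := hrp
    rw [List.mem_filterMap] at hinner
    obtain ⟨cp, hcp, hcpeq⟩ := hinner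
    rw [pvMem_enumerate] at hcp
    obtain ⟨m, hm, hcp1⟩ := hcp
    rw [PySem.List.slice_to _ hw] at hm
    by_cases hat : cp.2 = '@'
    · rw [if_pos hat] at hcpeq
      injection hcpeq with hpe
      subst hpe
      have hnlen : n < grid_lines.length := by
        by_contra hcon
        rw [List.getElem?_eq_none (by omega)] at hn
        simp at hn
      have hmlen : m < (rp.2.toList.take w.toNat).length := by
        by_contra hcon
        rw [List.getElem?_eq_none (by omega)] at hm
        simp at hm
      have hmw : m < w.toNat := by
        rw [List.length_take] at hmlen; omega
      refine ⟨by omega, by omega, by omega, by omega, ?_⟩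
      unfold pvCellA
      rw [PySem.List.pyGetD_of_nonneg _ _ (by omega), PySem.List.pyGetD_of_nonneg _ _ (by omega)]
      have hn' : grid_lines[n]? = some rp.2 := hn
      have : (grid_lines.map (fun row => row.toList)).getD (rp.1.toNat) [] = rp.2.toList := by
        rw [List.getD_eq_getElem?_getD, List.getElem?_map]
        simp [hrp1, hn']
      rw [this]
      have hidx : rp.2.toList[m]? = some cp.2 := by
        rw [List.getElem?_take] at hm
        simpa [hmw] using hm
      rw [List.getD_eq_getElem?_getD]
      simp [hcp1, hidx, hat]
    · rw [if_neg hat] at hcpeq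
      simp at hcpeq
  · rintro ⟨hp1, hp2, hp3, hp4, hcell⟩
    have hnlen : p.1.toNat < grid_lines.length := by omega
    have hrowget : grid_lines[p.1.toNat]? = some grid_lines[p.1.toNat] := List.getElem?_eq_getElem hnlen
    have hrlen : w ≤ (grid_lines[p.1.toNat].length : Int) :=
      hpre _ (List.getElem_mem hnlen)
    have hcw : p.2.toNat < w.toNat := by omega
    have hclen : p.2.toNat < grid_lines[p.1.toNat].toList.length := by
      have : grid_lines[p.1.toNat].toList.length = grid_lines[p.1.toNat].length := rfl
      omega
    unfold pvCellA at hcell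
    rw [PySem.List.pyGetD_of_nonneg _ _ hp1, PySem.List.pyGetD_of_nonneg _ _ hp3] at hcell
    have hrowD : (grid_lines.map (fun row => row.toList)).getD (p.1.toNat) [] = grid_lines[p.1.toNat].toList := by
      rw [List.getD_eq_getElem?_getD, List.getElem?_map]
      simp [hrowget]
    rw [hrowD, List.getD_eq_getElem?_getD, List.getElem?_eq_getElem hclen] at hcell
    simp only [Option.getD_some] at hcell
    refine ⟨(p.1, grid_lines[p.1.toNat]), ?_, ?_⟩
    · rw [pvMem_enumerate]
      exact ⟨p.1.toNat, hrowget, by omega⟩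
    · rw [List.mem_filterMap]
      refine ⟨(p.2, grid_lines[p.1.toNat].toList[p.2.toNat]), ?_, ?_⟩
      · rw [pvMem_enumerate, PySem.List.slice_to _ hw]
        refine ⟨p.2.toNat, ?_, by omega⟩
        rw [List.getElem?_take]
        simp [hcw, List.getElem?_eq_getElem hclen]
      · rw [if_pos hcell]

def pvInv (g : List (List Char)) (h w : Int) (rolls cands : PySem.Set (Int × Int)) : Prop :=
  pvShape g h w ∧ rolls.Nodup ∧ cands.Nodup ∧
  (∀ p : Int × Int, p ∈ rolls ↔ pvAlive g h w p.1 p.2) ∧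
  (∀ r c : Int, pvAlive g h w r c → pvAdjA g h w r c < 4 → (r, c) ∈ cands)

lemma pvLoopB_nil (f : Nat) (rolls : PySem.Set (Int × Int)) (total : Int) :
    pvLoopB rolls [] total f = total := by
  cases f <;> simp [pvLoopB]

lemma pvDirs_neg : ∀ d ∈ pvDirs, (-d.1, -d.2) ∈ pvDirs := by decide

lemma pvAlive_mono {g : List (List Char)} {h w : Int} (hs : pvShape g h w)
    (hrange : ∀ p ∈ pvRemovableA g h w, 0 ≤ p.1 ∧ p.1 < h ∧ 0 ≤ p.2 ∧ p.2 < w)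
    (r c : Int) (hal : pvAlive (pvRemoveA g (pvRemovableA g h w)) h w r c) :
    pvAlive g h w r c ∧ (r, c) ∉ pvRemovableA g h w := by
  obtain ⟨h1, h2, h3, h4, h5⟩ := hal
  rw [pvRemoveA_cell hs hrange r c h1 h3] at h5
  by_cases hmem : (r, c) ∈ pvRemovableA g h w
  · rw [if_pos hmem] at h5; exact absurd h5 (by decide)
  · rw [if_neg hmem] at h5; exact ⟨⟨h1, h2, h3, h4, h5⟩, hmem⟩

lemma pvLoop_eq {h w : Int} :
    ∀ (fuel : Nat) (g : List (List Char)) (rolls cands : PySem.Set (Int × Int)) (total : Int),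
      pvInv g h w rolls cands → rolls.length + 2 ≤ fuel →
      pvLoopA g h w total fuel = pvLoopB rolls cands total fuel := by
  intro fuel
  induction fuel with
  | zero => intro g rolls cands total _ hf; omega
  | succ fuel ih =>
    intro g rolls cands total hinv hf
    obtain ⟨hsh, hnr, hnc, hS2, hS4⟩ := hinv
    have hrangeA : ∀ p ∈ pvRemovableA g h w, 0 ≤ p.1 ∧ p.1 < h ∧ 0 ≤ p.2 ∧ p.2 < w := by
      intro p hp
      obtain ⟨⟨a1, a2, a3, a4, _⟩, _⟩ := (pvMem_removableA p).1 hp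
      exact ⟨a1, a2, a3, a4⟩
    have hAB : ∀ p : Int × Int, p ∈ pvRemovableA g h w ↔ p ∈ pvRemovableB cands rolls := by
      intro p
      rw [pvMem_removableA, pvMem_removableB, pvCountB_eq_adjA hS2]
      constructor
      · rintro ⟨hal, hadj⟩
        exact ⟨hS4 p.1 p.2 hal hadj, (hS2 p).2 hal, hadj⟩
      · rintro ⟨_, hr, hadj⟩
        exact ⟨(hS2 p).1 hr, hadj⟩
    have hnB : (pvRemovableB cands rolls).Nodup := List.Nodup.filter _ hnc
    have hperm : (pvRemovableA g h w).Perm (pvRemovableB cands rolls) :=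
      (List.perm_ext_iff_of_nodup (pvNodup_removableA g h w) hnB).2 hAB
    have hlen : (pvRemovableA g h w).length = (pvRemovableB cands rolls).length :=
      hperm.length_eq
    by_cases hre : pvRemovableA g h w = []
    · have hreB : pvRemovableB cands rolls = [] := by
        rw [List.eq_nil_iff_forall_not_mem] at hre ⊢
        intro p hp
        exact hre p ((hAB p).2 hp)
      have hA : pvLoopA g h w total (fuel + 1) = total := by
        simp only [pvLoopA, hre, if_pos]
      rw [hA]
      by_cases hcand : cands = []
      · rw [hcand, pvLoopB_nil]
      · simp only [pvLoopB, if_neg hcand, hreB]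
        simp only [List.flatMap_nil, List.length_nil, Nat.cast_zero, add_zero]
        have hofl : PySem.Set.ofList ([] : List (Int × Int)) = [] := rfl
        rw [hofl]
        have hint : PySem.Set.inter ([] : PySem.Set (Int × Int)) (PySem.Set.diff rolls []) = [] := rfl
        rw [hint, pvLoopB_nil]
    · -- a removal round happens on both sides
      have hreB : pvRemovableB cands rolls ≠ [] := by
        intro hcon
        rw [hcon] at hlen
        exact hre (List.eq_nil_of_length_eq_zero hlen)
      have hcand : cands ≠ [] := by
        intro hcon
        apply hreB
        unfold pvRemovableB
        rw [hcon]
        rfl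
      have hA : pvLoopA g h w total (fuel + 1) =
          pvLoopA (pvRemoveA g (pvRemovableA g h w)) h w (total + (pvRemovableA g h w).length) fuel := by
        simp only [pvLoopA, hre]; rfl
      have hB : pvLoopB rolls cands total (fuel + 1) =
          pvLoopB (PySem.Set.diff rolls (pvRemovableB cands rolls))
            (PySem.Set.inter
              (PySem.Set.ofList ((pvRemovableB cands rolls).flatMap
                (fun p => pvDirs.map (fun d => (p.1 + d.1, p.2 + d.2)))))
              (PySem.Set.diff rolls (pvRemovableB cands rolls)))
            (total + (pvRemovableB cands rolls).length) fuel := by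
        simp only [pvLoopB, if_neg hcand]
      rw [hA, hB, hlen]
      set g' := pvRemoveA g (pvRemovableA g h w) with hg'
      set rolls' := PySem.Set.diff rolls (pvRemovableB cands rolls) with hrolls'
      set cands' := PySem.Set.inter
        (PySem.Set.ofList ((pvRemovableB cands rolls).flatMap
          (fun p => pvDirs.map (fun d => (p.1 + d.1, p.2 + d.2))))) rolls' with hcands'
      have hcell : ∀ r c : Int, 0 ≤ r → 0 ≤ c →
          pvCellA g' r c = if (r, c) ∈ pvRemovableA g h w then '.' else pvCellA g r c :=
        fun r c hr hc => pvRemoveA_cell hsh hrangeA r c hr hc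
      have hS2' : ∀ p : Int × Int, p ∈ rolls' ↔ pvAlive g' h w p.1 p.2 := by
        intro p
        rw [hrolls', PySem.Set.mem_diff]
        constructor
        · rintro ⟨hpr, hpnb⟩
          have hal := (hS2 p).1 hpr
          obtain ⟨a1, a2, a3, a4, a5⟩ := hal
          have hpna : p ∉ pvRemovableA g h w := fun hcon => hpnb ((hAB p).1 hcon)
          refine ⟨a1, a2, a3, a4, ?_⟩
          rw [hcell p.1 p.2 a1 a3]
          simpa [hpna] using a5
        · intro hal'
          obtain ⟨hal, hpna⟩ := pvAlive_mono hsh hrangeA p.1 p.2 hal'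
          exact ⟨(hS2 p).2 hal, fun hcon => hpna ((hAB p).2 hcon)⟩
      refine ih g' rolls' cands' _ ⟨pvShape_removeA hsh hrangeA, PySem.Set.nodup_diff _ _ hnr,
        PySem.Set.nodup_inter _ _ (PySem.Set.nodup_ofList _), hS2', ?_⟩ ?_
      · -- S4': newly removable cells neighbour a removed cell
        intro r c hal' hadj'
        obtain ⟨hal, hpna⟩ := pvAlive_mono hsh hrangeA r c hal'
        have hadjge : ¬ pvAdjA g h w r c < 4 := by
          intro hlt
          exact hpna ((pvMem_removableA (r, c)).2 ⟨hal, hlt⟩)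
        have hmono : ∀ d ∈ pvDirs, pvAlive g' h w (r + d.1) (c + d.2) → pvAlive g h w (r + d.1) (c + d.2) :=
          fun d _ hq => (pvAlive_mono hsh hrangeA _ _ hq).1
        have hdiff : ∃ d ∈ pvDirs, pvAlive g h w (r + d.1) (c + d.2) ∧
            ¬ pvAlive g' h w (r + d.1) (c + d.2) := by
          by_contra hcon
          push Not at hcon
          have heq : pvAdjA g' h w r c = pvAdjA g h w r c := by
            rw [pvAdjA_eq_sum, pvAdjA_eq_sum]
            congr 1
            apply List.map_congr_left
            intro d hd
            by_cases hq : pvAlive g h w (r + d.1) (c + d.2)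
            · rw [if_pos hq, if_pos (hcon d hd hq)]
            · rw [if_neg hq, if_neg (fun hh => hq (hmono d hd hh))]
          omega
        obtain ⟨d, hd, hqal, hqal'⟩ := hdiff
        have hqrem : (r + d.1, c + d.2) ∈ pvRemovableA g h w := by
          by_contra hcon
          apply hqal'
          obtain ⟨b1, b2, b3, b4, b5⟩ := hqal
          refine ⟨b1, b2, b3, b4, ?_⟩
          rw [hcell _ _ b1 b3, if_neg hcon]
          exact b5
        rw [hcands', PySem.Set.mem_inter]
        constructor
        · rw [PySem.Set.mem_ofList, List.mem_flatMap]
          refine ⟨(r + d.1, c + d.2), (hAB _).1 hqrem, ?_⟩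
          rw [List.mem_map]
          refine ⟨(-d.1, -d.2), pvDirs_neg d hd, ?_⟩
          simp
        · exact (hS2' (r, c)).2 hal'
      · -- fuel bound: the set of rolls strictly shrinks
        obtain ⟨q, hqB⟩ := List.exists_mem_of_ne_nil _ hreB
        have hqr : q ∈ rolls := ((pvMem_removableB q).1 hqB).2.1
        have hsub : rolls' ⊆ rolls := by
          intro x hx
          exact ((PySem.Set.mem_diff _ _ _).1 hx).1
        have hqnr' : q ∉ rolls' := by
          intro hcon
          exact ((PySem.Set.mem_diff _ _ _).1 hcon).2 hqB
        have hlt : rolls'.length < rolls.length := by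
          have h1 : rolls'.toFinset ⊂ rolls.toFinset := by
            constructor
            · intro x hx
              rw [List.mem_toFinset] at hx ⊢
              exact hsub hx
            · intro hcon
              have := hcon (List.mem_toFinset.2 hqr)
              exact hqnr' (List.mem_toFinset.1 this)
          have h2 := Finset.card_lt_card h1
          rwa [List.toFinset_card_of_nodup (PySem.Set.nodup_diff _ _ hnr),
            List.toFinset_card_of_nodup hnr] at h2
        omega

lemma pvLen_enumerate {α : Type} (xs : List α) (s : Int) :
    (PySem.List.enumerate xs s).length = xs.length := by
  induction xs generalizing s with
  | nil => simp [PySem.List.enumerate_nil]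
  | cons x xs ih => rw [PySem.List.enumerate_cons]; simp [ih]

lemma pvLen_flatMap_le {α β : Type} (l : List α) (f : α → List β) (k : Nat)
    (hk : ∀ x ∈ l, (f x).length ≤ k) : (l.flatMap f).length ≤ l.length * k := by
  induction l with
  | nil => simp
  | cons x l ih =>
    rw [List.flatMap_cons, List.length_append]
    have h1 := hk x List.mem_cons_self
    have h2 := ih (fun y hy => hk y (List.mem_cons_of_mem _ hy))
    simp only [List.length_cons]
    calc (f x).length + (l.flatMap f).length ≤ k + l.length * k := by omega
      _ = (l.length + 1) * k := by ring

theorem pv_main (grid_lines : List String)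
    (hpre : ∀ s ∈ grid_lines, (grid_lines.headD "").length ≤ s.length) :
    total_removed_paper grid_lines = total_removed_paper_alt grid_lines := by
  unfold total_removed_paper total_removed_paper_alt
  simp only []
  have hwval : (if 0 < (grid_lines.length : Int) then ((grid_lines.headD "").length : Int) else 0)
      = ((grid_lines.headD "").length : Int) := by
    split_ifs with hpos
    · rfl
    · cases grid_lines with
      | nil => simp
      | cons a l => simp at hpos
  rw [hwval]
  set h : Int := (grid_lines.length : Int) with hh
  set w : Int := ((grid_lines.headD "").length : Int) with hw
  have hw0 : 0 ≤ w := by positivity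
  have hpre' : ∀ s ∈ grid_lines, w ≤ (s.length : Int) := by
    intro s hs
    rw [hw]
    exact_mod_cast hpre s hs
  have hshape : pvShape (grid_lines.map (fun row => row.toList)) h w := by
    constructor
    · simp [hh]
    · intro row hrow
      rw [List.mem_map] at hrow
      obtain ⟨s, hs, rfl⟩ := hrow
      have := hpre' s hs
      have hlen : s.toList.length = s.length := rfl
      omega
  have hS2 : ∀ p : Int × Int, p ∈ pvRollsB grid_lines w ↔
      pvAlive (grid_lines.map (fun row => row.toList)) h w p.1 p.2 := by
    intro p
    exact pvMem_rollsB hw0 hpre' p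
  have hinv : pvInv (grid_lines.map (fun row => row.toList)) h w
      (pvRollsB grid_lines w) (PySem.Set.ofList (pvRollsB grid_lines w)) := by
    refine ⟨hshape, PySem.Set.nodup_ofList _, PySem.Set.nodup_ofList _, hS2, ?_⟩
    intro r c hal _
    rw [PySem.Set.mem_ofList]
    exact (hS2 (r, c)).2 hal
  have hfuel : (pvRollsB grid_lines w).length + 2 ≤
      grid_lines.length * (grid_lines.headD "").length + 2 := by
    have h1 := PySem.Set.length_ofList_le ((PySem.List.enumerate grid_lines).flatMap (fun rp =>
      (PySem.List.enumerate (PySem.List.slice rp.2.toList none (some w))).filterMap (fun cp =>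
        if cp.2 = '@' then some (rp.1, cp.1) else none)))
    have h2 : ((PySem.List.enumerate grid_lines).flatMap (fun rp =>
        (PySem.List.enumerate (PySem.List.slice rp.2.toList none (some w))).filterMap (fun cp =>
          if cp.2 = '@' then some (rp.1, cp.1) else none))).length ≤
        grid_lines.length * (grid_lines.headD "").length := by
      have h3 := pvLen_flatMap_le (PySem.List.enumerate grid_lines) (fun rp =>
        (PySem.List.enumerate (PySem.List.slice rp.2.toList none (some w))).filterMap (fun cp =>
          if cp.2 = '@' then some (rp.1, cp.1) else none)) (grid_lines.headD "").length ?_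
      · rwa [pvLen_enumerate] at h3
      · intro rp _
        calc ((PySem.List.enumerate (PySem.List.slice rp.2.toList none (some w))).filterMap (fun cp =>
              if cp.2 = '@' then some (rp.1, cp.1) else none)).length
            ≤ (PySem.List.enumerate (PySem.List.slice rp.2.toList none (some w))).length :=
              List.length_filterMap_le _ _
          _ = (PySem.List.slice rp.2.toList none (some w)).length := pvLen_enumerate _ _
          _ ≤ (grid_lines.headD "").length := by
              rw [PySem.List.slice_to _ hw0, List.length_take]
              omega
    unfold pvRollsB
    omega
  exact pvLoop_eq _ _ _ _ 0 hinv hfuel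

-- ===== VERDICT (by name: the statement is the Claim_ definition above) =====
theorem total_removed_paper_spec : Claim_equal_total_removed_paper := by
  intro grid_lines _ hpre
  unfold Spec_total_removed_paper
  exact pv_main grid_lines hpre
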